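-- pv_equiv track=rewrite | github.com/aiarena/aiarena-docker-base | requirements_diff.py | compare_requirements
-- ===== SOURCE A (Python) =====
-- from typing import Dict, Tuple
--
-- def compare_requirements(before: Dict[str, str], after: Dict[str, str]) -> Tuple[Dict[str, Tuple[str, str]], set, set]:
--     """Compare two requirement dictionaries and return changes."""
--     changes = {}
--     removed = set(before.keys()) - set(after.keys())
--     added = set(after.keys()) - set(before.keys())
--
--     # Find version changes for packages present in both files
--     for package in set(before.keys()) & set(after.keys()):
--         if before[package] != after[package]:
--             changes[package] = (before[package], after[package])
--
--     return changes, removed, added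
-- ===== SOURCE B (Python) =====
-- def compare_requirements(before, after):
--     """Compare two requirement dictionaries and return changes."""
--     # Full outer join: merge both dicts into one table keyed by package,
--     # with None marking absence on either side, then classify each row.
--     combined = {}
--     for package, version in before.items():
--         combined[package] = (version, None)
--     for package, version in after.items():
--         if package in combined:
--             combined[package] = (combined[package][0], version)
--         else:
--             combined[package] = (None, version)
--
--     changes = {}
--     removed = set()
--     added = set()
--     for package, (old, new) in combined.items():
--         if new is None:
--             removed.add(package)
--         elif old is None:
--             added.add(package)
--         elif old != new:
--             changes[package] = (old, new)
--     return changes, removed, added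
-- ===== Notes on version B (the rewrite author's own statement) =====
-- stated objective: alternative
-- what changed: Replaces A's set-difference/intersection algebra by a full outer join: both dicts are merged into one table keyed by package with (old, new) values and None marking absence, and a single classifying pass over that table emits removed/added/changes.
import Mathlib
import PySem

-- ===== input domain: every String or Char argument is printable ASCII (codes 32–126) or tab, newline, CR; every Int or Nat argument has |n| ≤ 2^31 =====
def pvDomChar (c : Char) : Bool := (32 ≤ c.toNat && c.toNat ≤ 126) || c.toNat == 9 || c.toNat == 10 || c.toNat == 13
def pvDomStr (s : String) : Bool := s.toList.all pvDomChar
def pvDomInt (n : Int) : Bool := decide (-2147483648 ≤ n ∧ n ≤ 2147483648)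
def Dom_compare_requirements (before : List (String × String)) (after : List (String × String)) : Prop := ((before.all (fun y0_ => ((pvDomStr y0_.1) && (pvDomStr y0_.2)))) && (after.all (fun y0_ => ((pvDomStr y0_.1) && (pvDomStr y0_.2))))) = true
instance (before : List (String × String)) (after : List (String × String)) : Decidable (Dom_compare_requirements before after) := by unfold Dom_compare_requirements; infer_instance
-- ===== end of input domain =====

-- B replaces A's set-difference/intersection algebra by a full outer join: both dicts are
-- merged into one table keyed by package, then a single pass classifies each row
-- (alternative algorithm, same cost).


-- ===== PORT A =====
-- the intersection keys are present in both dicts, so the total lookup getD "" is exact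
-- for before[package] / after[package]; the changes dict is built iterating the
-- intersection set (dict outputs are compared ignoring order)
def compare_requirements (before : List (String × String)) (after : List (String × String)) : (List (String × String × String)) × List String × List String :=
  let bd : PySem.Dict String String := PySem.Dict.mk before
  let ad : PySem.Dict String String := PySem.Dict.mk after
  let bk : PySem.Set String := PySem.Set.ofList bd.keys
  let ak : PySem.Set String := PySem.Set.ofList ad.keys
  let removed := PySem.Set.diff bk ak
  let added := PySem.Set.diff ak bk
  let changes := (PySem.Set.inter bk ak).foldl
    (fun ch p =>
      if bd.getD p "" ≠ ad.getD p "" then ch.insert p (bd.getD p "", ad.getD p "") else ch)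
    PySem.Dict.empty
  (changes.items, removed, added)

-- ===== PORT B =====
-- full outer join: one merged table keyed by package with (old?, new?) values (none marks
-- absence on that side), built by one pass over each input, then a single classifying pass
-- over the table's rows emits removed / added / changes
def compare_requirements_alt (before : List (String × String)) (after : List (String × String)) : (List (String × String × String)) × List String × List String :=
  let c1 : PySem.Dict String (Option String × Option String) :=
    before.foldl (fun d kv => d.insert kv.1 (some kv.2, (none : Option String))) PySem.Dict.empty
  let combined : PySem.Dict String (Option String × Option String) :=
    after.foldl
      (fun d kv =>
        if d.contains kv.1 then d.insert kv.1 ((d.getD kv.1 (none, none)).1, some kv.2)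
        else d.insert kv.1 ((none : Option String), some kv.2))
      c1
  let res := combined.items.foldl
    (fun (st : PySem.Dict String (String × String) × PySem.Set String × PySem.Set String) p =>
      match p.2.2 with
      | none => (st.1, PySem.Set.add st.2.1 p.1, st.2.2)
      | some n =>
        match p.2.1 with
        | none => (st.1, st.2.1, PySem.Set.add st.2.2 p.1)
        | some o => if o ≠ n then (st.1.insert p.1 (o, n), st.2.1, st.2.2) else st)
    (PySem.Dict.empty, PySem.Set.empty, PySem.Set.empty)
  (res.1.items, res.2.1, res.2.2)

-- ===== PRECONDITION & SPEC =====
-- Python dicts cannot hold a repeated key, so association lists with duplicate keys do not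
-- represent a dict input; Pre_ excludes exactly those lists.
def Pre_compare_requirements (before : List (String × String)) (after : List (String × String)) : Prop :=
  (before.map Prod.fst).Nodup ∧ (after.map Prod.fst).Nodup
instance (before : List (String × String)) (after : List (String × String)) : Decidable (Pre_compare_requirements before after) := by unfold Pre_compare_requirements; infer_instance
def pvWitness_compare_requirements : (List (String × String)) × (List (String × String)) :=
  ([("a", "1"), ("b", "2")], [("b", "3"), ("c", "4")])

def Spec_compare_requirements (before : List (String × String)) (after : List (String × String)) (out : (List (String × String × String)) × List String × List String) : Prop := out = compare_requirements_alt before after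
instance (before : List (String × String)) (after : List (String × String)) (out : (List (String × String × String)) × List String × List String) : Decidable (Spec_compare_requirements before after out) := by unfold Spec_compare_requirements; infer_instance

-- ===== CLAIM (what is proved, stated in full; the proofs are below) =====
def Claim_equal_compare_requirements : Prop := ∀ (before : List (String × String)) (after : List (String × String)), Dom_compare_requirements before after → Pre_compare_requirements before after → Spec_compare_requirements before after (compare_requirements before after)

-- ===== LEMMAS AND PROOFS =====

-- a fold whose step fires only on elements satisfying c is a fold over the filtered list
theorem pv_foldl_if {α β : Type} (l : List β) (c : β → Bool) (g : α → β → α) :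
    ∀ a : α, l.foldl (fun s x => if c x then g s x else s) a = (l.filter c).foldl g a := by
  induction l with
  | nil => intro a; rfl
  | cons x t ih =>
    intro a
    by_cases h : c x = true <;> simp [h, ih]

-- a fold with a Prop-conditioned step fires only on elements satisfying c
theorem pv_foldl_ite {α β : Type} (l : List β) (c : β → Prop) [DecidablePred c] (g : α → β → α) :
    ∀ a : α, l.foldl (fun s x => if c x then g s x else s) a
      = (l.filter (fun x => decide (c x))).foldl g a := by
  induction l with
  | nil => intro a; rfl
  | cons x t ih =>
    intro a
    by_cases h : c x <;> simp [h, ih]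

-- a fold with a triple state whose components evolve independently splits in three folds
theorem pv_foldl_triple {α γ δ β : Type} (l : List β) (step : α × γ × δ → β → α × γ × δ)
    (f : α → β → α) (g : γ → β → γ) (h : δ → β → δ)
    (hs : ∀ (a : α) (c : γ) (e : δ) (x : β), step (a, c, e) x = (f a x, g c x, h e x)) :
    ∀ (a : α) (c : γ) (e : δ), l.foldl step (a, c, e) = (l.foldl f a, l.foldl g c, l.foldl h e) := by
  induction l with
  | nil => intro a c e; rfl
  | cons x t ih => intro a c e; simp [List.foldl_cons, hs, ih]

-- a fold whose step leaves the state unchanged on every element is the identity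
theorem pv_foldl_id {α β : Type} (l : List β) (f : α → β → α)
    (h : ∀ (a : α) (x : β), x ∈ l → f a x = a) : ∀ a : α, l.foldl f a = a := by
  induction l with
  | nil => intro a; rfl
  | cons x t ih =>
    intro a
    rw [List.foldl_cons, h a x (by simp)]
    exact ih (fun a x hx => h a x (by simp [hx])) a

theorem pv_map_fst_filter {κ ν : Type} (l : List (κ × ν)) (p : κ → Bool) :
    ((l.filter (fun kv => p kv.1)).map Prod.fst) = (l.map Prod.fst).filter p := by
  induction l with
  | nil => rfl
  | cons x t ih => by_cases h : p x.1 = true <;> simp [h, ih]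

-- the classifying filter over pairs equals the key-level filter when val reads the value back
theorem pv_changes_bridge (c : String → Bool) (w : String → String) (val : String → String) :
    ∀ (l : List (String × String)), (∀ kv ∈ l, val kv.1 = kv.2) →
    (l.filter (fun kv => c kv.1 && decide (kv.2 ≠ w kv.1))).map (fun kv => (kv.1, kv.2, w kv.1))
      = ((l.map Prod.fst).filter (fun p => c p && decide (val p ≠ w p))).map
          (fun p => (p, val p, w p)) := by
  intro l
  induction l with
  | nil => intro _; rfl
  | cons kv t ih =>
    intro h
    have hv : val kv.1 = kv.2 := h kv (by simp)
    have ht := ih (fun x hx => h x (by simp [hx]))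
    have hcond : (c kv.1 && decide (val kv.1 ≠ w kv.1)) = (c kv.1 && decide (kv.2 ≠ w kv.1)) := by
      rw [hv]
    simp only [List.map_cons, List.filter_cons, hcond]
    split_ifs with hd
    · simp [hv]
      simpa using ht
    · simpa using ht

-- Dict.contains on a literal dict agrees with Set.contains on the deduplicated key set
theorem pv_contains_bridge (l : List (String × String)) (k : String) :
    (PySem.Dict.mk l).contains k
      = PySem.Set.contains (PySem.Set.ofList ((PySem.Dict.mk l).keys)) k := by
  rw [Bool.eq_iff_iff]
  constructor
  · intro h
    have := (PySem.Dict.contains_iff_mem_keys (PySem.Dict.mk l) k).mp h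
    exact (PySem.Set.contains_iff _ _).mpr ((PySem.Set.mem_ofList _ _).mpr this)
  · intro h
    have := (PySem.Set.mem_ofList _ _).mp ((PySem.Set.contains_iff _ _).mp h)
    exact (PySem.Dict.contains_iff_mem_keys _ _).mpr this

-- every pair of a duplicate-free association list is read back by getD
theorem pv_getD_mk (l : List (String × String)) (h : (l.map Prod.fst).Nodup) :
    ∀ kv ∈ l, (PySem.Dict.mk l).getD kv.1 "" = kv.2 := by
  intro kv hkv
  exact PySem.Dict.getD_of_mem_items (d := PySem.Dict.mk l) (k := kv.1) (v := kv.2)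
    (by simpa using hkv) (by simpa [PySem.Dict.keys] using h) ""

-- Dict.contains on a duplicate-free literal dict is membership of the key list
theorem pv_contains_nodup (l : List (String × String)) (h : (l.map Prod.fst).Nodup) (k : String) :
    (PySem.Dict.mk l).contains k = PySem.Set.contains (List.map Prod.fst l) k := by
  rw [pv_contains_bridge]
  rw [PySem.Set.ofList_eq_self_of_nodup ((PySem.Dict.mk l).keys) h]
  rfl

-- the join pass of B: folding after's pairs into a table d updates the second slot of the
-- rows whose key occurs in the list and appends a (none, some v) row for each fresh key
theorem pv_join_items (l : List (String × String)) :
    ∀ (d : PySem.Dict String (Option String × Option String)),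
    d.keys.Nodup → (l.map Prod.fst).Nodup →
    (l.foldl
      (fun d kv =>
        if d.contains kv.1 then d.insert kv.1 ((d.getD kv.1 (none, none)).1, some kv.2)
        else d.insert kv.1 ((none : Option String), some kv.2))
      d).items
    = d.items.map (fun p =>
        match (PySem.Dict.mk l).get? p.1 with
        | some v => (p.1, (p.2.1, some v))
        | none => p)
      ++ (l.filter (fun kv => !d.contains kv.1)).map
          (fun kv => (kv.1, ((none : Option String), some kv.2))) := by
  induction l with
  | nil =>
    intro d _ _
    simp [PySem.Dict.get?]
  | cons kv t ih =>
    intro d hd hl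
    rw [List.map_cons, List.nodup_cons] at hl
    have hkt : kv.1 ∉ t.map Prod.fst := hl.1
    have hlt : (t.map Prod.fst).Nodup := hl.2
    have hget_t : (PySem.Dict.mk t).get? kv.1 = none := by
      rw [PySem.Dict.get?_eq_none_iff_not_mem_keys]
      simpa [PySem.Dict.keys] using hkt
    rw [List.foldl_cons]
    by_cases hc : d.contains kv.1 = true
    · -- the key is already in the table: its row's second slot is overwritten in place
      have hmemk : kv.1 ∈ d.keys := (PySem.Dict.contains_iff_mem_keys d kv.1).mp hc
      simp only [hc, if_true]
      set d' := d.insert kv.1 ((d.getD kv.1 (none, none)).1, some kv.2) with hd'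
      have hnd' : d'.keys.Nodup := PySem.Dict.nodup_keys_insert d _ _ hd
      rw [ih d' hnd' hlt]
      have hitems : d'.items = d.items.map
          (fun p => if p.1 == kv.1 then (kv.1, ((d.getD kv.1 (none, none)).1, some kv.2)) else p) :=
        PySem.Dict.items_insert_of_contains d _ hc
      have hmap : d'.items.map (fun p =>
            match (PySem.Dict.mk t).get? p.1 with
            | some v => (p.1, (p.2.1, some v))
            | none => p)
          = d.items.map (fun p =>
            match (PySem.Dict.mk ((kv :: t) : List (String × String))).get? p.1 with
            | some v => (p.1, (p.2.1, some v))
            | none => p) := by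
        rw [hitems, List.map_map]
        refine List.map_congr_left ?_
        intro p hp
        by_cases hpk : p.1 = kv.1
        · have hval : d.getD p.1 (none, none) = p.2 :=
            PySem.Dict.getD_of_mem_items (d := d) (k := p.1) (v := p.2) (by simpa using hp) hd (none, none)
          simp only [Function.comp_apply, hpk, beq_self_eq_true, if_true]
          rw [hget_t]
          rw [PySem.Dict.get?_mk_cons]
          simp [hpk, ← hval]
        · have hbeq : (p.1 == kv.1) = false := by simpa using hpk
          simp only [Function.comp_apply, hbeq, Bool.false_eq_true, if_false]
          rw [PySem.Dict.get?_mk_cons]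
          have : (kv.1 == p.1) = false := by simpa using (Ne.symm hpk)
          simp [this]
      rw [hmap]
      congr 1
      have hflt : t.filter (fun x => !d'.contains x.1) = t.filter (fun x => !d.contains x.1) := by
        refine List.filter_congr ?_
        intro x hx
        have hxk : x.1 ≠ kv.1 := by
          intro hxe
          exact hkt (hxe ▸ List.mem_map_of_mem hx)
        rw [hd', PySem.Dict.contains_insert]
        simp [hxk]
      rw [hflt]
      simp [hc]
    · -- the key is fresh: a new (none, some v) row is appended
      have hc' : d.contains kv.1 = false := by simpa using hc
      have hnotk : kv.1 ∉ d.keys := fun h => hc ((PySem.Dict.contains_iff_mem_keys d kv.1).mpr h)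
      simp only [hc', Bool.false_eq_true, if_false]
      set d' := d.insert kv.1 ((none : Option String), some kv.2) with hd'
      have hnd' : d'.keys.Nodup := PySem.Dict.nodup_keys_insert d _ _ hd
      rw [ih d' hnd' hlt]
      have hitems : d'.items = d.items ++ [(kv.1, ((none : Option String), some kv.2))] :=
        PySem.Dict.items_insert_of_not_contains d _ hc'
      rw [hitems, List.map_append]
      have hmap : d.items.map (fun p =>
            match (PySem.Dict.mk t).get? p.1 with
            | some v => (p.1, (p.2.1, some v))
            | none => p)
          = d.items.map (fun p =>
            match (PySem.Dict.mk ((kv :: t) : List (String × String))).get? p.1 with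
            | some v => (p.1, (p.2.1, some v))
            | none => p) := by
        refine List.map_congr_left ?_
        intro p hp
        have hpk : p.1 ≠ kv.1 := by
          intro hpe
          exact hnotk (hpe ▸ PySem.Dict.mem_keys_of_mem_items (d := d) hp)
        rw [PySem.Dict.get?_mk_cons]
        have : (kv.1 == p.1) = false := by simpa using (Ne.symm hpk)
        simp [this]
      rw [hmap]
      have hnew : (fun p : String × (Option String × Option String) =>
            match (PySem.Dict.mk t).get? p.1 with
            | some v => (p.1, (p.2.1, some v))
            | none => p) (kv.1, ((none : Option String), some kv.2))
          = (kv.1, ((none : Option String), some kv.2)) := by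
        simp [hget_t]
      have hflt : t.filter (fun x => !d'.contains x.1) = t.filter (fun x => !d.contains x.1) := by
        refine List.filter_congr ?_
        intro x hx
        have hxk : x.1 ≠ kv.1 := by
          intro hxe
          exact hkt (hxe ▸ List.mem_map_of_mem hx)
        rw [hd', PySem.Dict.contains_insert]
        simp [hxk]
      rw [hflt]
      simp only [List.map_cons, List.map_nil, hnew, List.filter_cons, hc', Bool.not_false,
        if_true, List.append_assoc, List.singleton_append]

-- ===== VERDICT (by name: the statement is the Claim_ definition above) =====
theorem compare_requirements_spec : Claim_equal_compare_requirements := by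
  intro before after _ hpre
  obtain ⟨hb, ha⟩ := hpre
  unfold Spec_compare_requirements compare_requirements compare_requirements_alt
  dsimp only
  have hkb : (PySem.Dict.mk before).keys = before.map Prod.fst := rfl
  have hka : (PySem.Dict.mk after).keys = after.map Prod.fst := rfl
  have hcb : ∀ k, (PySem.Dict.mk before).contains k
      = PySem.Set.contains (List.map Prod.fst before) k := pv_contains_nodup before hb
  have hca : ∀ k, (PySem.Dict.mk after).contains k
      = PySem.Set.contains (List.map Prod.fst after) k := pv_contains_nodup after ha
  -- the first join pass: the table holds one (some v, none) row per before item
  have hc1 : (before.foldl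
        (fun d kv => d.insert kv.1 (some kv.2, (none : Option String))) PySem.Dict.empty).items
      = before.map (fun kv => (kv.1, (some kv.2, (none : Option String)))) := by
    have := PySem.Dict.items_foldl_insert_fresh before
      (k := Prod.fst) (v := fun kv => (some kv.2, (none : Option String)))
      (d := PySem.Dict.empty) (fun a _ => rfl) hb
    simpa using this
  have hc1keys : (before.foldl
        (fun d kv => d.insert kv.1 (some kv.2, (none : Option String))) PySem.Dict.empty).keys
      = before.map Prod.fst := by
    show (before.foldl
        (fun d kv => d.insert kv.1 (some kv.2, (none : Option String)))
        PySem.Dict.empty).items.map Prod.fst = _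
    rw [hc1, List.map_map]
    rfl
  have hc1nd : (before.foldl
        (fun d kv => d.insert kv.1 (some kv.2, (none : Option String))) PySem.Dict.empty).keys.Nodup := by
    rw [hc1keys]; exact hb
  have hc1c : ∀ x, (before.foldl
        (fun d kv => d.insert kv.1 (some kv.2, (none : Option String))) PySem.Dict.empty).contains x
      = (PySem.Dict.mk before).contains x := by
    intro x
    rw [Bool.eq_iff_iff, PySem.Dict.contains_iff_mem_keys, PySem.Dict.contains_iff_mem_keys,
      hc1keys, hkb]
  -- the second join pass: rows gain their after version, fresh after keys append rows
  have hcomb := pv_join_items after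
    (before.foldl (fun d kv => d.insert kv.1 (some kv.2, (none : Option String))) PySem.Dict.empty)
    hc1nd ha
  rw [hc1] at hcomb
  rw [hcomb]
  -- rewrite the joined row list into its two closed maps over before and after
  have hL1 : (before.map (fun kv => (kv.1, (some kv.2, (none : Option String))))).map
        (fun p => match (PySem.Dict.mk after).get? p.1 with
          | some v => (p.1, (p.2.1, some v))
          | none => p)
      = before.map (fun kv => (kv.1, (some kv.2, (PySem.Dict.mk after).get? kv.1))) := by
    rw [List.map_map]
    refine List.map_congr_left ?_
    intro kv _
    cases hq : (PySem.Dict.mk after).get? kv.1 <;> simp [hq]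
  have hL2 : after.filter (fun kv => !(before.foldl
        (fun d kv => d.insert kv.1 (some kv.2, (none : Option String)))
        PySem.Dict.empty).contains kv.1)
      = after.filter (fun kv => !(PySem.Dict.mk before).contains kv.1) := by
    refine List.filter_congr ?_
    intro kv _
    rw [hc1c kv.1]
  rw [hL1, hL2]
  -- split the classifying fold into its three independent component folds
  have htriple := pv_foldl_triple
    (before.map (fun kv => (kv.1, (some kv.2, (PySem.Dict.mk after).get? kv.1)))
      ++ (after.filter (fun kv => !(PySem.Dict.mk before).contains kv.1)).map
          (fun kv => (kv.1, ((none : Option String), some kv.2))))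
    (fun (st : PySem.Dict String (String × String) × PySem.Set String × PySem.Set String) p =>
      match p.2.2 with
      | none => (st.1, PySem.Set.add st.2.1 p.1, st.2.2)
      | some n =>
        match p.2.1 with
        | none => (st.1, st.2.1, PySem.Set.add st.2.2 p.1)
        | some o => if o ≠ n then (st.1.insert p.1 (o, n), st.2.1, st.2.2) else st)
    (fun (ch : PySem.Dict String (String × String)) p =>
      match p.2.2 with
      | none => ch
      | some n =>
        match p.2.1 with
        | none => ch
        | some o => if o ≠ n then ch.insert p.1 (o, n) else ch)
    (fun (r : PySem.Set String) p =>
      match p.2.2 with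
      | none => PySem.Set.add r p.1
      | some _ => r)
    (fun (ad : PySem.Set String) p =>
      match p.2.2 with
      | none => ad
      | some _ =>
        match p.2.1 with
        | none => PySem.Set.add ad p.1
        | some _ => ad)
    (by
      rintro a c e ⟨k, o, n⟩
      cases n with
      | none => rfl
      | some n' =>
        cases o with
        | none => rfl
        | some o' =>
          dsimp only
          split_ifs <;> rfl)
    PySem.Dict.empty PySem.Set.empty PySem.Set.empty
  rw [htriple, List.foldl_append, List.foldl_append, List.foldl_append]
  refine Prod.ext ?_ (Prod.ext ?_ ?_)
  -- changes
  · dsimp only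
    -- the appended (none, some v) rows never touch changes
    rw [pv_foldl_id
      ((after.filter (fun kv => !(PySem.Dict.mk before).contains kv.1)).map
        (fun kv => (kv.1, ((none : Option String), some kv.2))))
      _ (by
        intro a x hx
        obtain ⟨kv, _, rfl⟩ := List.mem_map.mp hx
        rfl)]
    rw [List.foldl_map]
    -- the row-level classification over before's rows is the key-level conditional insert
    have hstep : (fun (ch : PySem.Dict String (String × String)) (kv : String × String) =>
          match ((kv.1, (some kv.2, (PySem.Dict.mk after).get? kv.1)) :
              String × Option String × Option String).2.2 with
          | none => ch
          | some n =>
            match ((kv.1, (some kv.2, (PySem.Dict.mk after).get? kv.1)) :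
                String × Option String × Option String).2.1 with
            | none => ch
            | some o => if o ≠ n then ch.insert (kv.1, (some kv.2,
                (PySem.Dict.mk after).get? kv.1)).1 (o, n) else ch)
        = (fun (ch : PySem.Dict String (String × String)) (kv : String × String) =>
          if (PySem.Dict.mk after).contains kv.1 = true
              ∧ kv.2 ≠ (PySem.Dict.mk after).getD kv.1 "" then
            ch.insert kv.1 (kv.2, (PySem.Dict.mk after).getD kv.1 "") else ch) := by
      funext ch kv
      cases hq : (PySem.Dict.mk after).get? kv.1 with
      | none =>
        have hcf : (PySem.Dict.mk after).contains kv.1 = false := by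
          rw [PySem.Dict.contains_eq_isSome_get?, hq]; rfl
        simp [hcf]
      | some n =>
        have hct : (PySem.Dict.mk after).contains kv.1 = true := by
          rw [PySem.Dict.contains_eq_isSome_get?, hq]; rfl
        have hgd : (PySem.Dict.mk after).getD kv.1 "" = n :=
          PySem.Dict.getD_of_get?_eq_some _ "" hq
        by_cases hne : kv.2 = n <;> simp [hct, hgd, hne]
    rw [hstep]
    -- now both sides are conditional-insert folds; reduce each to a filtered map
    rw [pv_foldl_ite before
      (fun kv : String × String => (PySem.Dict.mk after).contains kv.1 = true
        ∧ kv.2 ≠ (PySem.Dict.mk after).getD kv.1 "")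
      (fun ch kv => ch.insert kv.1 (kv.2, (PySem.Dict.mk after).getD kv.1 ""))
      PySem.Dict.empty]
    have eA := pv_foldl_ite
        (PySem.Set.inter (PySem.Set.ofList ((PySem.Dict.mk before).keys))
          (PySem.Set.ofList ((PySem.Dict.mk after).keys)))
        (fun p => (PySem.Dict.mk before).getD p "" ≠ (PySem.Dict.mk after).getD p "")
        (fun ch p => ch.insert p ((PySem.Dict.mk before).getD p "", (PySem.Dict.mk after).getD p ""))
        PySem.Dict.empty
    rw [eA]
    rw [hkb, hka, PySem.Set.ofList_eq_self_of_nodup _ hb, PySem.Set.ofList_eq_self_of_nodup _ ha]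
    have hAint : PySem.Set.inter (List.map Prod.fst before) (List.map Prod.fst after)
        = (List.map Prod.fst before).filter
            (fun x => PySem.Set.contains (List.map Prod.fst after) x) := rfl
    rw [hAint, List.filter_filter]
    have iA := PySem.Dict.items_foldl_insert_fresh
        ((List.map Prod.fst before).filter
          (fun a => decide ((PySem.Dict.mk before).getD a "" ≠ (PySem.Dict.mk after).getD a "")
            && PySem.Set.contains (List.map Prod.fst after) a))
        (fun p => p)
        (fun p => ((PySem.Dict.mk before).getD p "", (PySem.Dict.mk after).getD p ""))
        PySem.Dict.empty (fun a _ => rfl)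
        (by simpa using (hb.filter _))
    have iB := PySem.Dict.items_foldl_insert_fresh
        (before.filter (fun kv => decide ((PySem.Dict.mk after).contains kv.1 = true
            ∧ kv.2 ≠ (PySem.Dict.mk after).getD kv.1 "")))
        Prod.fst
        (fun kv => (kv.2, (PySem.Dict.mk after).getD kv.1 ""))
        PySem.Dict.empty (fun a _ => rfl)
        (List.Nodup.sublist (List.Sublist.map Prod.fst List.filter_sublist) hb)
    rw [iA, iB]
    have hBpred : (fun kv : String × String =>
          decide ((PySem.Dict.mk after).contains kv.1 = true
            ∧ kv.2 ≠ (PySem.Dict.mk after).getD kv.1 ""))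
        = (fun kv : String × String => (PySem.Dict.mk after).contains kv.1
            && decide (kv.2 ≠ (PySem.Dict.mk after).getD kv.1 "")) := by
      funext kv; simp
    have hApred : (fun a : String =>
          decide ((PySem.Dict.mk before).getD a "" ≠ (PySem.Dict.mk after).getD a "")
            && PySem.Set.contains (List.map Prod.fst after) a)
        = (fun a : String => (PySem.Dict.mk after).contains a
            && decide ((PySem.Dict.mk before).getD a "" ≠ (PySem.Dict.mk after).getD a ""))
        := by
      funext a; rw [hca a, Bool.and_comm]
    rw [hApred, hBpred]
    have hbr := pv_changes_bridge (fun k => (PySem.Dict.mk after).contains k)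
      (fun k => (PySem.Dict.mk after).getD k "") (fun k => (PySem.Dict.mk before).getD k "")
      before (pv_getD_mk before hb)
    simpa using hbr.symm
  -- removed
  · dsimp only
    -- the appended (none, some v) rows never touch removed
    rw [pv_foldl_id
      ((after.filter (fun kv => !(PySem.Dict.mk before).contains kv.1)).map
        (fun kv => (kv.1, ((none : Option String), some kv.2))))
      _ (by
        intro a x hx
        obtain ⟨kv, _, rfl⟩ := List.mem_map.mp hx
        rfl)]
    rw [List.foldl_map]
    have hstep : (fun (r : PySem.Set String) (kv : String × String) =>
          match ((kv.1, (some kv.2, (PySem.Dict.mk after).get? kv.1)) :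
              String × Option String × Option String).2.2 with
          | none => PySem.Set.add r (kv.1, (some kv.2, (PySem.Dict.mk after).get? kv.1)).1
          | some _ => r)
        = (fun (r : PySem.Set String) (kv : String × String) =>
          if !(PySem.Dict.mk after).contains kv.1 then PySem.Set.add r kv.1 else r) := by
      funext r kv
      cases hq : (PySem.Dict.mk after).get? kv.1 with
      | none =>
        have hcf : (PySem.Dict.mk after).contains kv.1 = false := by
          rw [PySem.Dict.contains_eq_isSome_get?, hq]; rfl
        simp [hcf]
      | some n =>
        have hct : (PySem.Dict.mk after).contains kv.1 = true := by
          rw [PySem.Dict.contains_eq_isSome_get?, hq]; rfl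
        simp [hct]
    rw [hstep]
    rw [pv_foldl_if before (fun kv => !(PySem.Dict.mk after).contains kv.1)
      (fun s kv => PySem.Set.add s kv.1) PySem.Set.empty]
    rw [hkb, hka, PySem.Set.ofList_eq_self_of_nodup _ hb, PySem.Set.ofList_eq_self_of_nodup _ ha]
    have hempty : (PySem.Set.empty : PySem.Set String) = [] := rfl
    have eU := PySem.Set.update_map_eq_foldl_add
        (before.filter (fun kv => !((PySem.Dict.mk after)).contains kv.1)) Prod.fst []
    have eM := pv_map_fst_filter before (fun k => !(PySem.Dict.mk after).contains k)
    rw [hempty, ← eU, PySem.Set.update_nil_left, eM,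
      PySem.Set.ofList_eq_self_of_nodup _ (hb.filter _)]
    show (before.map Prod.fst).filter
        (fun x => !PySem.Set.contains (List.map Prod.fst after) x) = _
    exact List.filter_congr (fun x _ => by rw [hca x])
  -- added
  · dsimp only
    -- before's rows never touch added (their first slot is always some)
    rw [pv_foldl_id
      (before.map (fun kv => (kv.1, (some kv.2, (PySem.Dict.mk after).get? kv.1))))
      _ (by
        intro a x hx
        obtain ⟨kv, _, rfl⟩ := List.mem_map.mp hx
        cases hq : (PySem.Dict.mk after).get? kv.1 <;> simp)]
    rw [List.foldl_map]
    rw [hkb, hka, PySem.Set.ofList_eq_self_of_nodup _ hb, PySem.Set.ofList_eq_self_of_nodup _ ha]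
    have hempty : (PySem.Set.empty : PySem.Set String) = [] := rfl
    have eU := PySem.Set.update_map_eq_foldl_add
        (after.filter (fun kv => !((PySem.Dict.mk before)).contains kv.1)) Prod.fst []
    have eM := pv_map_fst_filter after (fun k => !(PySem.Dict.mk before).contains k)
    show _ = (after.filter (fun kv => !(PySem.Dict.mk before).contains kv.1)).foldl
        (fun e kv => PySem.Set.add e kv.1) []
    rw [← eU, PySem.Set.update_nil_left, eM,
      PySem.Set.ofList_eq_self_of_nodup _ (ha.filter _)]
    show (after.map Prod.fst).filter
        (fun x => !PySem.Set.contains (List.map Prod.fst before) x) = _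
    exact List.filter_congr (fun x _ => by rw [hcb x])
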